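-- pv_equiv track=rewrite | github.com/dr-rosen-rosen/bioTDMS_explainer | src/components/top_down_view.py | _group_constructs
-- ===== SOURCE A (Python) =====
-- from typing import Dict, List, Optional
--
-- def _group_constructs(constructs: List[Dict]) -> Dict[str, List[Dict]]:
--     """Group constructs into categories"""
--     # Simple grouping logic - could be enhanced with ontology structure
--     groups = {
--         'Cognitive': [],
--         'Social': [],
--         'Performance': [],
--         'Communication': [],
--         'Other': []
--     }
--
--     for construct in constructs:
--         label = construct['label'].lower()
--         if any(term in label for term in ['cognit', 'mental', 'aware']):
--             groups['Cognitive'].append(construct)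
--         elif any(term in label for term in ['cohes', 'conflict', 'coordin']):
--             groups['Social'].append(construct)
--         elif any(term in label for term in ['perform', 'effect']):
--             groups['Performance'].append(construct)
--         elif any(term in label for term in ['commun']):
--             groups['Communication'].append(construct)
--         else:
--             groups['Other'].append(construct)
--
--     # Remove empty groups
--     return {k: v for k, v in groups.items() if v}
-- ===== SOURCE B (Python) =====
-- def _group_constructs(constructs):
--     """Group constructs into categories (table-driven classifier)."""
--     table = [
--         ('Cognitive', ['cognit', 'mental', 'aware']),
--         ('Social', ['cohes', 'conflict', 'coordin']),
--         ('Performance', ['perform', 'effect']),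
--         ('Communication', ['commun']),
--     ]
--
--     def category(construct):
--         label = construct['label'].lower()
--         for name, terms in table:
--             if any(term in label for term in terms):
--                 return name
--         return 'Other'
--
--     result = {}
--     for name in ['Cognitive', 'Social', 'Performance', 'Communication', 'Other']:
--         grp = [c for c in constructs if category(c) == name]
--         if grp:
--             result[name] = grp
--     return result
-- ===== Notes on version B (the rewrite author's own statement) =====
-- stated objective: idiomatic
-- what changed: Replaces the if/elif chain mutating a pre-built dict in one pass with a table-driven classifier function plus a per-category filter pass that builds only the non-empty groups, so the dict of empty lists and the final pruning comprehension disappear.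
import Mathlib
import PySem

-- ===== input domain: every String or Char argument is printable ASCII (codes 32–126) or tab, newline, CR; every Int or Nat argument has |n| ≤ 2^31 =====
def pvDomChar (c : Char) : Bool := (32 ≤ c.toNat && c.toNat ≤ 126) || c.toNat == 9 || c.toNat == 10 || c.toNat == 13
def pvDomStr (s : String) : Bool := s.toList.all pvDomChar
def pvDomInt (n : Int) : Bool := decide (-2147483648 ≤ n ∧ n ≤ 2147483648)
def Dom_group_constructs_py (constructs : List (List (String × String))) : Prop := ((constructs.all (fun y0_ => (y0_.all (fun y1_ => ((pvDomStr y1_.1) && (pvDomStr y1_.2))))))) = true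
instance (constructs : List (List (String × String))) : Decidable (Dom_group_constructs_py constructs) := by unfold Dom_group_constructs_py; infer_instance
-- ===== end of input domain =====

-- B groups by a table-driven classifier plus a per-category filter pass instead of A's if/elif chain mutating a dict of empty lists (objective: idiomatic).

-- ===== PORT A =====
-- construct['label'] : first-match assoc-list lookup; Pre_ guarantees the key exists, so the getD "" default is never taken
def group_constructs_py (constructs : List (List (String × String))) : List (String × List (List (String × String))) :=
  let groups0 : PySem.Dict String (List (List (String × String))) :=
    PySem.Dict.mk [("Cognitive", []), ("Social", []), ("Performance", []), ("Communication", []), ("Other", [])]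
  let groups := constructs.foldl (fun g c =>
    let label := PySem.Str.lower ((c.lookup "label").getD "")
    if ["cognit", "mental", "aware"].any (fun t => PySem.Str.isIn t label) then
      g.modify "Cognitive" [] (· ++ [c])
    else if ["cohes", "conflict", "coordin"].any (fun t => PySem.Str.isIn t label) then
      g.modify "Social" [] (· ++ [c])
    else if ["perform", "effect"].any (fun t => PySem.Str.isIn t label) then
      g.modify "Performance" [] (· ++ [c])
    else if ["commun"].any (fun t => PySem.Str.isIn t label) then
      g.modify "Communication" [] (· ++ [c])
    else
      g.modify "Other" [] (· ++ [c])) groups0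
  groups.items.filter (fun kv => !kv.2.isEmpty)

-- ===== PORT B =====
def pvTable : List (String × List String) :=
  [("Cognitive", ["cognit", "mental", "aware"]),
   ("Social", ["cohes", "conflict", "coordin"]),
   ("Performance", ["perform", "effect"]),
   ("Communication", ["commun"])]

def pvCategory (c : List (String × String)) : String :=
  let label := PySem.Str.lower ((c.lookup "label").getD "")
  match pvTable.find? (fun row => row.2.any (fun t => PySem.Str.isIn t label)) with
  | some row => row.1
  | none => "Other"

def group_constructs_py_alt (constructs : List (List (String × String))) : List (String × List (List (String × String))) :=
  (["Cognitive", "Social", "Performance", "Communication", "Other"]).foldl (fun res name =>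
    let grp := constructs.filter (fun c => pvCategory c == name)
    if grp.isEmpty then res else res ++ [(name, grp)]) []

-- ===== PRECONDITION & SPEC =====
-- Pre_ excludes constructs lacking a 'label' key, on which the Python A raises KeyError (returns nothing).
def Pre_group_constructs_py (constructs : List (List (String × String))) : Prop :=
  (constructs.all (fun c => (c.lookup "label").isSome)) = true
instance (constructs : List (List (String × String))) : Decidable (Pre_group_constructs_py constructs) := by unfold Pre_group_constructs_py; infer_instance
def pvWitness_group_constructs_py : (List (List (String × String))) := [[("label", "Team Cognition")], [("label", "trust")]]

def Spec_group_constructs_py (constructs : List (List (String × String))) (out : List (String × List (List (String × String)))) : Prop := out = group_constructs_py_alt constructs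
instance (constructs : List (List (String × String))) (out : List (String × List (List (String × String)))) : Decidable (Spec_group_constructs_py constructs out) := by unfold Spec_group_constructs_py; infer_instance

-- ===== CLAIM (what is proved, stated in full; the proofs are below) =====
def Claim_equal_group_constructs_py : Prop := ∀ (constructs : List (List (String × String))), Dom_group_constructs_py constructs → Pre_group_constructs_py constructs → Spec_group_constructs_py constructs (group_constructs_py constructs)

-- ===== LEMMAS AND PROOFS =====

-- A's if/elif step is exactly "modify at the category B computes"
theorem pvStepEq (g : PySem.Dict String (List (List (String × String)))) (c : List (String × String)) :
    (let label := PySem.Str.lower ((c.lookup "label").getD "")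
     if ["cognit", "mental", "aware"].any (fun t => PySem.Str.isIn t label) then
       g.modify "Cognitive" [] (· ++ [c])
     else if ["cohes", "conflict", "coordin"].any (fun t => PySem.Str.isIn t label) then
       g.modify "Social" [] (· ++ [c])
     else if ["perform", "effect"].any (fun t => PySem.Str.isIn t label) then
       g.modify "Performance" [] (· ++ [c])
     else if ["commun"].any (fun t => PySem.Str.isIn t label) then
       g.modify "Communication" [] (· ++ [c])
     else
       g.modify "Other" [] (· ++ [c])) = g.modify (pvCategory c) [] (· ++ [c]) := by
  simp only [pvCategory, pvTable, List.find?]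
  split_ifs <;> simp_all only [Bool.not_eq_true]

theorem pvCategory_mem (c : List (String × String)) :
    pvCategory c ∈ ["Cognitive", "Social", "Performance", "Communication", "Other"] := by
  simp only [pvCategory]
  rcases hf : List.find? (fun row => row.2.any fun t => PySem.Str.isIn t (PySem.Str.lower ((List.lookup "label" c).getD ""))) pvTable with _ | row
  · rw [hf]; simp
  · rw [hf]
    have hm := List.mem_of_find?_eq_some hf
    simp only [pvTable, List.mem_cons, List.not_mem_nil, or_false] at hm
    rcases hm with h | h | h | h <;> simp [h]

theorem pvSetUpdate_of_subset {s : PySem.Set String} {xs : List String}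
    (h : ∀ x ∈ xs, x ∈ s) : PySem.Set.update s xs = s := by
  induction xs with
  | nil => rfl
  | cons x xs ih =>
    rw [PySem.Set.update_cons, PySem.Set.add_of_mem (h x (by simp))]
    exact ih (fun y hy => h y (by simp [hy]))

theorem pvFoldChar (constructs : List (List (String × String))) (name : String) :
    (constructs.foldl (fun g c => g.modify (pvCategory c) [] (· ++ [c]))
      (PySem.Dict.mk [("Cognitive", []), ("Social", []), ("Performance", []), ("Communication", []), ("Other", [])])).getD name []
    = constructs.filter (fun c => pvCategory c == name) := by
  have hpair : constructs.foldl (fun g c => g.modify (pvCategory c) [] (· ++ [c]))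
      (PySem.Dict.mk [("Cognitive", []), ("Social", []), ("Performance", []), ("Communication", []), ("Other", [])])
    = (constructs.map (fun c => (pvCategory c, c))).foldl (fun d p => d.modify p.1 [] (· ++ [p.2]))
      (PySem.Dict.mk [("Cognitive", []), ("Social", []), ("Performance", []), ("Communication", []), ("Other", [])]) := by
    rw [List.foldl_map]
  rw [hpair, PySem.Dict.getD_foldl_modify_append]
  have h0 : (PySem.Dict.mk ([("Cognitive", []), ("Social", []), ("Performance", []), ("Communication", []), ("Other", [])] : List (String × List (List (String × String))))).getD name [] = [] := by
    simp only [PySem.Dict.getD_eq_get?_getD, PySem.Dict.get?_mk_cons]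
    split_ifs <;> rfl
  rw [h0]
  rw [List.filter_map]
  simp [Function.comp_def, List.map_map]

theorem pvFoldKeys (constructs : List (List (String × String))) :
    (constructs.foldl (fun g c => g.modify (pvCategory c) [] (· ++ [c]))
      (PySem.Dict.mk [("Cognitive", []), ("Social", []), ("Performance", []), ("Communication", []), ("Other", [])])).keys
    = ["Cognitive", "Social", "Performance", "Communication", "Other"] := by
  rw [PySem.Dict.keys_foldl_modify_key]
  have hk : (PySem.Dict.mk ([("Cognitive", []), ("Social", []), ("Performance", []), ("Communication", []), ("Other", [])] : List (String × List (List (String × String))))).keys = ["Cognitive", "Social", "Performance", "Communication", "Other"] := by decide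
  rw [hk]
  apply pvSetUpdate_of_subset
  intro x hx
  simp only [List.mem_map] at hx
  obtain ⟨c, _, rfl⟩ := hx
  exact pvCategory_mem c

theorem pvAssembleGen (gf : String → List (List (String × String))) (names : List String)
    (res : List (String × List (List (String × String)))) :
    names.foldl (fun res name => if (gf name).isEmpty then res else res ++ [(name, gf name)]) res
      = res ++ (names.map (fun k => (k, gf k))).filter (fun kv => !kv.2.isEmpty) := by
  induction names generalizing res with
  | nil => simp
  | cons n ns ih =>
    simp only [List.foldl_cons, List.map_cons, List.filter_cons]
    by_cases h : (gf n).isEmpty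
    · rw [if_pos h, ih]
      simp [h]
    · rw [if_neg h, ih]
      simp [h]

-- ===== VERDICT (by name: the statement is the Claim_ definition above) =====
set_option maxHeartbeats 1000000 in
theorem group_constructs_py_spec : Claim_equal_group_constructs_py := by
  intro constructs _ _
  show _ = _
  unfold group_constructs_py group_constructs_py_alt
  simp only [pvStepEq]
  set G := constructs.foldl (fun g c => g.modify (pvCategory c) [] (· ++ [c]))
      (PySem.Dict.mk [("Cognitive", []), ("Social", []), ("Performance", []), ("Communication", []), ("Other", [])]) with hG
  have hkeys := pvFoldKeys constructs
  rw [← hG] at hkeys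
  have hnd : G.keys.Nodup := by rw [hkeys]; decide
  have hitems := PySem.Dict.items_eq_map_keys G hnd []
  rw [hkeys] at hitems
  have hgetD : ∀ name, G.getD name [] = constructs.filter (fun c => pvCategory c == name) := by
    intro name; rw [hG]; exact pvFoldChar constructs name
  have hmap : (["Cognitive", "Social", "Performance", "Communication", "Other"].map (fun k => (k, G.getD k [])))
      = ["Cognitive", "Social", "Performance", "Communication", "Other"].map
          (fun k => (k, constructs.filter (fun c => pvCategory c == k))) := by
    simp only [hgetD]
  rw [hitems, hmap]
  have hAG := pvAssembleGen (fun name => constructs.filter (fun c => pvCategory c == name))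
      ["Cognitive", "Social", "Performance", "Communication", "Other"] []
  rw [List.nil_append] at hAG
  exact hAG.symm
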